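-- pv_equiv track=rewrite | github.com/ChahelPaatur/Self-Modifying-Program-Synthesis-via-Online-Library-Evolution | models/hybrid_super/solver.py | apply_gravity_right
-- ===== SOURCE A (Python) =====
-- from typing import List, Dict, Tuple, Optional, Set, Callable
--
-- Grid = List[List[int]]
--
-- def apply_gravity_right(g: Grid, bg: int = 0) -> Grid:
--     if not g:
--         return g
--     h, w = len(g), len(g[0])
--     result = [[bg] * w for _ in range(h)]
--     for r in range(h):
--         stack = [g[r][c] for c in range(w) if g[r][c] != bg]
--         for i, val in enumerate(stack):
--             result[r][w - 1 - i] = val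
--     return result
-- ===== SOURCE B (Python) =====
-- def apply_gravity_right(g, bg=0):
--     # Build each output row directly: accumulate non-bg cells by prepending
--     # (which yields them in reversed encounter order, as A's right-to-left
--     # scatter does), then pad with bg on the left.
--     if not g:
--         return g
--     w = len(g[0])
--     out = []
--     for row in g:
--         rev = []
--         for c in range(w):
--             v = row[c]
--             if v != bg:
--                 rev = [v] + rev
--         out.append([bg] * (w - len(rev)) + rev)
--     return out
-- ===== Notes on version B (the rewrite author's own statement) =====
-- stated objective: simpler
-- what changed: Each output row is built directly (prepend-accumulate the non-background cells, then left-pad with bg) instead of preallocating a bg-filled grid and scatter-assigning values from the right via enumerate indices.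
import Mathlib
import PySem

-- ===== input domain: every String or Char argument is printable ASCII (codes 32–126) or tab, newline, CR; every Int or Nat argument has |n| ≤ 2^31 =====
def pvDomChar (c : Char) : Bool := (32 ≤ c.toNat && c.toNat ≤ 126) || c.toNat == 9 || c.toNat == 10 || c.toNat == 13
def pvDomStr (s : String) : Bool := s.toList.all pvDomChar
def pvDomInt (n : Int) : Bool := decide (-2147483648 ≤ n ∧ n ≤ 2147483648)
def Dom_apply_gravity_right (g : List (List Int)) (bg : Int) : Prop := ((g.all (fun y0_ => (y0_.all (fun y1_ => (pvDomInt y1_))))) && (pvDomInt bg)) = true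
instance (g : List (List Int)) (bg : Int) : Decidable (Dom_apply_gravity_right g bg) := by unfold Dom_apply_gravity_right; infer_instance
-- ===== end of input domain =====

-- B builds each output row directly (prepend-accumulate non-bg cells, then left-pad with bg)
-- instead of A's scatter-assignment into a preallocated bg grid; objective: simpler.


-- ===== PORT A =====
def apply_gravity_right (g : List (List Int)) (bg : Int) : List (List Int) :=
  match g with
  | [] => g
  | g0 :: _ =>
    let h := g.length
    let w := g0.length
    -- result = [[bg]*w for _ in range(h)]; rows are mutated independently, so we
    -- compute each result row from its r (g[r][c] via pyGet?, in range under Pre_)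
    (List.range h).map (fun (r : Nat) =>
      let row := (PySem.List.pyGet? g (r : Int)).getD []
      let stack := (List.range w).filterMap (fun (c : Nat) =>
        match PySem.List.pyGet? row (c : Int) with
        | some v => if v ≠ bg then some v else none
        | none => none)
      (PySem.List.enumerate stack 0).foldl
        (fun res iv => res.set (w - 1 - iv.1.toNat) iv.2)
        (List.replicate w bg))

-- ===== PORT B =====
def apply_gravity_right_alt (g : List (List Int)) (bg : Int) : List (List Int) :=
  match g with
  | [] => g
  | g0 :: _ =>
    let w := g0.length
    g.map (fun row =>
      let rev := (List.range w).foldl (fun (rev : List Int) (c : Nat) =>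
        match PySem.List.pyGet? row (c : Int) with
        | some v => if v ≠ bg then v :: rev else rev
        | none => rev) []
      List.replicate (w - rev.length) bg ++ rev)

-- ===== PRECONDITION & SPEC =====
-- Pre_ excludes exactly the ragged grids on which A raises IndexError:
-- every row must be at least as long as the first row (whose length is w).
def Pre_apply_gravity_right (g : List (List Int)) (_bg : Int) : Prop :=
  ∀ row ∈ g, (g.headD []).length ≤ row.length
instance (g : List (List Int)) (bg : Int) : Decidable (Pre_apply_gravity_right g bg) := by
  unfold Pre_apply_gravity_right; infer_instance

def pvWitness_apply_gravity_right : List (List Int) × Int := ([[1, 0, 2], [0, 3, 0]], 0)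

def Spec_apply_gravity_right (g : List (List Int)) (bg : Int) (out : List (List Int)) : Prop := out = apply_gravity_right_alt g bg
instance (g : List (List Int)) (bg : Int) (out : List (List Int)) : Decidable (Spec_apply_gravity_right g bg out) := by unfold Spec_apply_gravity_right; infer_instance

-- ===== CLAIM (what is proved, stated in full; the proofs are below) =====
def Claim_equal_apply_gravity_right : Prop := ∀ (g : List (List Int)) (bg : Int), Dom_apply_gravity_right g bg → Pre_apply_gravity_right g bg → Spec_apply_gravity_right g bg (apply_gravity_right g bg)

-- ===== LEMMAS AND PROOFS =====

-- B's inner fold prepends, producing the reverse of A's stack (a filterMap).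
theorem revfold_eq_reverse_filterMap (f : Nat → Option Int) (g : List Int → Nat → List Int)
    (hg : ∀ (a : List Int) (c : Nat), g a c = match f c with | some v => v :: a | none => a) :
    ∀ (l : List Nat) (acc : List Int),
      l.foldl g acc = (l.filterMap f).reverse ++ acc := by
  intro l
  induction l with
  | nil => intro acc; simp
  | cons c t ih =>
    intro acc
    rw [List.foldl_cons, hg, List.filterMap_cons]
    cases f c <;> simp [ih]

theorem take_set_of_le (l : List Int) (i k : Nat) (v : Int) (h : k ≤ i) :
    (l.set i v).take k = l.take k := by
  apply List.ext_getElem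
  · simp
  · intro n h1 h2
    simp only [List.length_take, List.length_set] at h1
    simp only [List.getElem_take, List.getElem_set]
    rw [if_neg (by omega)]

theorem drop_set_cons (l : List Int) (i : Nat) (v : Int) (h : i < l.length) :
    (l.set i v).drop i = v :: l.drop (i + 1) := by
  apply List.ext_getElem
  · simp; omega
  · intro n h1 h2
    cases n with
    | zero => simp [List.getElem_drop, List.getElem_set]
    | succ m =>
      simp only [List.getElem_drop, List.getElem_set, List.getElem_cons_succ]
      rw [if_neg (by omega)]
      congr 1
      omega

-- A's scatter loop over the enumerated stack, characterized in closed form.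
theorem scatter_eq (w : Nat) :
    ∀ (stack : List Int) (s : Nat) (res : List Int),
      s + stack.length ≤ w → res.length = w →
      (PySem.List.enumerate stack (s : Int)).foldl
          (fun r iv => r.set (w - 1 - iv.1.toNat) iv.2) res
        = res.take (w - s - stack.length) ++ stack.reverse ++ res.drop (w - s) := by
  intro stack
  induction stack with
  | nil =>
    intro s res hle hlen
    simp [PySem.List.enumerate]
  | cons v t ih =>
    intro s res hle hlen
    rw [show ((s : Int)) = ((s : Nat) : Int) from rfl]
    rw [PySem.List.enumerate_cons]
    simp only [List.foldl_cons]
    have hcast : ((s : Int) + 1) = (((s + 1 : Nat)) : Int) := by push_cast; ring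
    rw [hcast]
    rw [ih (s + 1) (res.set (w - 1 - ((s : Int)).toNat) v)
        (by simp at hle ⊢; omega) (by simp [hlen])]
    have hs : ((s : Int)).toNat = s := by simp
    rw [hs]
    have hlt : w - 1 - s < res.length := by simp at hle; omega
    rw [take_set_of_le _ _ _ _ (by simp at hle; omega)]
    rw [show w - (s + 1) = w - 1 - s by omega, drop_set_cons _ _ _ hlt]
    rw [show w - 1 - s + 1 = w - s by simp at hle; omega]
    simp only [List.length_cons, List.reverse_cons]
    rw [show w - s - (t.length + 1) = w - (s + 1) - t.length by omega]
    rw [show w - 1 - s - t.length = w - (s + 1) - t.length by omega]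
    simp [List.append_assoc]

-- Pointwise row equality: A's row r equals B's row for row = g[r].
theorem row_eq (w : Nat) (bg : Int) (row : List Int) (hw : w ≤ row.length) :
    (PySem.List.enumerate
        ((List.range w).filterMap (fun (c : Nat) =>
          match PySem.List.pyGet? row (c : Int) with
          | some v => if v ≠ bg then some v else none
          | none => none)) 0).foldl
        (fun res iv => res.set (w - 1 - iv.1.toNat) iv.2)
        (List.replicate w bg)
      = (let rev := (List.range w).foldl (fun (rev : List Int) (c : Nat) =>
            match PySem.List.pyGet? row (c : Int) with
            | some v => if v ≠ bg then v :: rev else rev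
            | none => rev) []
         List.replicate (w - rev.length) bg ++ rev) := by
  have hrev := revfold_eq_reverse_filterMap
    (fun (c : Nat) =>
      match PySem.List.pyGet? row (c : Int) with
      | some v => if v ≠ bg then some v else none
      | none => none)
    (fun (rev : List Int) (c : Nat) =>
      match PySem.List.pyGet? row (c : Int) with
      | some v => if v ≠ bg then v :: rev else rev
      | none => rev)
    (by
      intro a c
      cases h : PySem.List.pyGet? row (c : Int) with
      | none => simp [h]
      | some v => by_cases hv : v = bg <;> simp [h, hv])
    (List.range w) []
  rw [List.append_nil] at hrev
  set f : Nat → Option Int := fun (c : Nat) =>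
    match PySem.List.pyGet? row (c : Int) with
    | some v => if v ≠ bg then some v else none
    | none => none with hf
  set stack := (List.range w).filterMap f with hstack
  have hslen : stack.length ≤ w := by
    calc stack.length ≤ (List.range w).length := List.length_filterMap_le _ _
    _ = w := List.length_range
  have h0 : ((0 : Int)) = ((0 : Nat) : Int) := rfl
  rw [h0, scatter_eq w stack 0 (List.replicate w bg) (by omega) (by simp)]
  simp only [hrev]
  rw [List.take_replicate, List.drop_replicate]
  simp only [Nat.sub_zero]
  rw [show min (w - stack.length) w = w - stack.length by omega]
  simp [List.length_reverse]

-- ===== VERDICT (by name: the statement is the Claim_ definition above) =====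
theorem apply_gravity_right_spec : Claim_equal_apply_gravity_right := by
  intro g bg _ hpre
  unfold Spec_apply_gravity_right
  cases g with
  | nil => rfl
  | cons g0 rest =>
    unfold apply_gravity_right apply_gravity_right_alt
    simp only
    apply List.ext_getElem
    · simp
    · intro r h1 h2
      simp only [List.getElem_map, List.getElem_range]
      have hr : r < (g0 :: rest).length := by simpa using h1
      have hget : PySem.List.pyGet? (g0 :: rest) (r : Int) = some ((g0 :: rest)[r]) := by
        simp [PySem.List.pyGet?_natCast, hr]
      rw [hget]
      simp only [Option.getD_some]
      exact row_eq g0.length bg ((g0 :: rest)[r])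
        (hpre _ (List.getElem_mem _))
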